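-- pv_equiv track=rewrite | github.com/Bruhtek/agh-wdi | zestawy/02 - tablice 1D/z89.py | to_quatenary
-- ===== SOURCE A (Python) =====
-- def to_quatenary(n)->int:
--     res = 0
--     mult = 1
--     while n > 0:
--         res += (n%4) * mult
--         mult *= 10
--         n //= 4
--     return res
-- ===== SOURCE B (Python) =====
-- def to_quatenary(n) -> int:
--     # Recursive high-to-low base-4 conversion instead of A's iterative
--     # low-to-high multiplier accumulation.
--     if n <= 0:
--         return 0
--     return to_quatenary(n // 4) * 10 + n % 4
-- ===== Notes on version B (the rewrite author's own statement) =====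
-- stated objective: alternative
-- what changed: Replaces A's iterative low-to-high accumulation with an explicit multiplier by a direct recursion on n//4 that builds the decimal encoding high-to-low via *10 + digit.
import Mathlib
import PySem

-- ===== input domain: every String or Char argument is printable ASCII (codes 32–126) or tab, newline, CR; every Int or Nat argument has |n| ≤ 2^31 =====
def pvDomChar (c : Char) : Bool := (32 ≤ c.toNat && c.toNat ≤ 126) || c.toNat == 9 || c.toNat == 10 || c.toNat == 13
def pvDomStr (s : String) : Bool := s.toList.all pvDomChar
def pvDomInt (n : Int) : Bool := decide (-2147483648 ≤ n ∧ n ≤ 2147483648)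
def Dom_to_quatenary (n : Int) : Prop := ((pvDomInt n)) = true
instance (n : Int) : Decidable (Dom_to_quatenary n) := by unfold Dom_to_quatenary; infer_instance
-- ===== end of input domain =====

-- B re-implements A's iterative low-to-high multiplier accumulation as a direct
-- recursion on n//4 building the decimal encoding high-to-low (alternative; same cost).

-- termination helper used by both ports
theorem pv_div4_lt (n : Int) (h : 0 < n) : (PySem.Int.floordiv n 4).toNat < n.toNat := by
  rw [PySem.Int.floordiv_eq_ediv_of_pos (by omega)]
  omega

-- ===== PORT A =====
def to_quatenary_loop (n res mult : Int) : Int :=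
  if h : n > 0 then
    to_quatenary_loop (PySem.Int.floordiv n 4) (res + PySem.Int.mod n 4 * mult) (mult * 10)
  else res
termination_by n.toNat
decreasing_by exact pv_div4_lt n h

def to_quatenary (n : Int) : Int := to_quatenary_loop n 0 1

-- ===== PORT B =====
def to_quatenary_alt (n : Int) : Int :=
  if h : n ≤ 0 then 0
  else to_quatenary_alt (PySem.Int.floordiv n 4) * 10 + PySem.Int.mod n 4
termination_by n.toNat
decreasing_by exact pv_div4_lt n (by omega)

-- ===== PRECONDITION & SPEC =====
def Spec_to_quatenary (n : Int) (out : Int) : Prop := out = to_quatenary_alt n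
instance (n : Int) (out : Int) : Decidable (Spec_to_quatenary n out) := by unfold Spec_to_quatenary; infer_instance

-- ===== CLAIM (what is proved, stated in full; the proofs are below) =====
def Claim_equal_to_quatenary : Prop := ∀ (n : Int), Dom_to_quatenary n → Spec_to_quatenary n (to_quatenary n)

-- ===== LEMMAS AND PROOFS =====
theorem loop_eq_alt (k : Nat) : ∀ (n res mult : Int), n.toNat ≤ k →
    to_quatenary_loop n res mult = res + mult * to_quatenary_alt n := by
  induction k with
  | zero =>
    intro n res mult hn
    have h0 : ¬ n > 0 := by omega
    have h1 : n ≤ 0 := by omega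
    rw [to_quatenary_loop, to_quatenary_alt]
    simp [h0, h1]
  | succ k ih =>
    intro n res mult hn
    by_cases h : n > 0
    · rw [to_quatenary_loop, to_quatenary_alt]
      have h1 : ¬ n ≤ 0 := by omega
      simp only [h, dif_pos, h1, dif_neg, not_false_iff]
      rw [ih _ _ _ (by have := pv_div4_lt n h; omega)]
      ring
    · rw [to_quatenary_loop, to_quatenary_alt]
      have h1 : n ≤ 0 := by omega
      simp [h, h1]

-- ===== VERDICT (by name: the statement is the Claim_ definition above) =====
theorem to_quatenary_spec : Claim_equal_to_quatenary := by
  intro n _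
  show to_quatenary n = to_quatenary_alt n
  rw [to_quatenary, loop_eq_alt n.toNat n 0 1 le_rfl]
  ring
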